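-- pv_equiv track=rewrite | github.com/aniketk33/LeetcodeSolutions | 2D-dynamic-programming/flip-string-monotonic.py | flip_2
-- ===== SOURCE A (Python) =====
-- def flip_2(s):
--     count = 0
--     result = 0
--     for char in s:
--         if char == "1":
--             count += 1
--         else:
--             # get the min of total flips so far and count of 1's
--             result = min(1 + result, count)
--
--     return result
-- ===== SOURCE B (Python) =====
-- def flip_2(s):
--     # first pass: count total zeros (characters that are not "1");
--     # second pass: for each split point keep ones-before and zeros-after,
--     # the answer is the minimum of ones_before + zeros_after over all splits.
--     zeros_after = sum(1 for c in s if c != "1")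
--     ones_before = 0
--     best = zeros_after  # split before the first character
--     for c in s:
--         if c == "1":
--             ones_before += 1
--         else:
--             zeros_after -= 1
--         best = min(best, ones_before + zeros_after)
--     return best
-- ===== Notes on version B (the rewrite author's own statement) =====
-- stated objective: alternative
-- what changed: B replaces A's running DP accumulator min(1+result, count) with the split-point view: it precomputes the total zero count, then scans once maintaining ones-before and zeros-after the split and takes the minimum cost over all split points.
import Mathlib
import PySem

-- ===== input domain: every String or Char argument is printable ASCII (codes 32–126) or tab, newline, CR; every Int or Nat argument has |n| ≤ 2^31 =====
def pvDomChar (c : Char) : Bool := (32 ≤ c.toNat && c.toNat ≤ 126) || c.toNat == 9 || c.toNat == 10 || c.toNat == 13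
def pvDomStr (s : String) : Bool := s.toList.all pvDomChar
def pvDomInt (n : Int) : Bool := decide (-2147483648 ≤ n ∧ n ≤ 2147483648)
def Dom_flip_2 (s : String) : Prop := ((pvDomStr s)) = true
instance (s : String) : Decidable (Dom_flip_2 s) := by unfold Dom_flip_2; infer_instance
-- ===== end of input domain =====

-- B replaces A's running DP accumulator with a precomputed zero count plus a
-- ones-before / zeros-after scan over all split points (alternative decomposition).
-- Python's min(x, y) is transliterated as 'if x ≤ y then x else y' (exact).

-- ===== PORT A =====
-- state = (count, result); for each char: '1' bumps count, otherwise result = min(1+result, count)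
def flip_2 (s : String) : Int :=
  (s.toList.foldl
    (fun (st : Int × Int) c =>
      if c = '1' then (st.1 + 1, st.2)
      else (st.1, if 1 + st.2 ≤ st.1 then 1 + st.2 else st.1))
    (0, 0)).2

-- ===== PORT B =====
-- first fold = the 'sum(1 for c in s if c != "1")' pass; second fold = the split scan
-- with state (ones_before, zeros_after, best)
def flip_2_alt (s : String) : Int :=
  let z : Int := s.toList.foldl (fun a c => if c ≠ '1' then a + 1 else a) 0
  (s.toList.foldl
    (fun (st : Int × Int × Int) c =>
      let ob := if c = '1' then st.1 + 1 else st.1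
      let za := if c = '1' then st.2.1 else st.2.1 - 1
      (ob, za, if st.2.2 ≤ ob + za then st.2.2 else ob + za))
    (0, z, z)).2.2

-- ===== PRECONDITION & SPEC =====
def Spec_flip_2 (s : String) (out : Int) : Prop := out = flip_2_alt s
instance (s : String) (out : Int) : Decidable (Spec_flip_2 s out) := by unfold Spec_flip_2; infer_instance

-- ===== CLAIM (what is proved, stated in full; the proofs are below) =====
def Claim_equal_flip_2 : Prop := ∀ (s : String), Dom_flip_2 s → Spec_flip_2 s (flip_2 s)

-- ===== LEMMAS AND PROOFS =====

-- number of non-'1' characters, as an Int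
def pvZeros (l : List Char) : Int := (l.countP (fun c => !(c = '1')) : Nat)

lemma pvZeros_cons (c : Char) (t : List Char) :
    pvZeros (c :: t) = (if c = '1' then 0 else 1) + pvZeros t := by
  simp [pvZeros, List.countP_cons]
  by_cases h : c = '1' <;> simp [h]
  ring

-- B's first pass computes pvZeros
lemma zeros_fold (l : List Char) : ∀ (a : Int),
    l.foldl (fun a c => if c ≠ '1' then a + 1 else a) a = a + pvZeros l := by
  induction l with
  | nil => intro a; simp [pvZeros]
  | cons c t ih =>
    intro a
    rw [List.foldl_cons, ih, pvZeros_cons]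
    by_cases h : c = '1' <;> simp [h]
    ring

-- Joint loop invariant: starting from an A-state (count, result) with result ≤ count
-- and a B-state (count, pvZeros q, result + pvZeros q), the two folds over the
-- remaining suffix q produce the same answer.
lemma key : ∀ (q : List Char) (count result best za : Int),
    result ≤ count → za = pvZeros q → best = result + za →
    (q.foldl
      (fun (st : Int × Int × Int) c =>
        let ob := if c = '1' then st.1 + 1 else st.1
        let za := if c = '1' then st.2.1 else st.2.1 - 1
        (ob, za, if st.2.2 ≤ ob + za then st.2.2 else ob + za))
      (count, za, best)).2.2 =
    (q.foldl
      (fun (st : Int × Int) c =>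
        if c = '1' then (st.1 + 1, st.2)
        else (st.1, if 1 + st.2 ≤ st.1 then 1 + st.2 else st.1))
      (count, result)).2 := by
  intro q
  induction q with
  | nil =>
    intro count result best za hrc hza hbest
    simp [hbest, hza, pvZeros]
  | cons c t ih =>
    intro count result best za hrc hza hbest
    rw [pvZeros_cons] at hza
    by_cases h : c = '1'
    · simp only [List.foldl_cons, h, if_true]
      have hza' : za = pvZeros t := by simp [h] at hza; omega
      have : (if best ≤ count + 1 + za then best else count + 1 + za) = result + za := by
        split_ifs <;> omega
      simpa [this] using ih (count + 1) result (result + za) za (by omega) hza' rfl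
    · simp only [List.foldl_cons, if_neg h]
      have hza' : za - 1 = pvZeros t := by simp [h] at hza; omega
      have : (if best ≤ count + (za - 1) then best else count + (za - 1)) =
          (if 1 + result ≤ count then 1 + result else count) + (za - 1) := by
        split_ifs <;> omega
      simpa [this] using
        ih count (if 1 + result ≤ count then 1 + result else count)
          ((if 1 + result ≤ count then 1 + result else count) + (za - 1)) (za - 1)
          (by split_ifs <;> omega) hza' rfl

-- ===== VERDICT (by name: the statement is the Claim_ definition above) =====
theorem flip_2_spec : Claim_equal_flip_2 := by
  intro s _
  unfold Spec_flip_2 flip_2 flip_2_alt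
  rw [zeros_fold]
  exact (key s.toList 0 0 (0 + pvZeros s.toList) (0 + pvZeros s.toList) le_rfl
    (by ring) (by ring)).symm
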